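-- pv_equiv track=rewrite | github.com/shravan861/class | python/spy_num.py | spy_number
-- ===== SOURCE A (Python) =====
-- def spy_number(n):
--     sum=0
--     product=1
--     while n>0:
--         sum+=n%10
--         product*=n%10
--         n//=10
--     return sum==product
-- ===== SOURCE B (Python) =====
-- def spy_number(n):
--     if n <= 0:
--         return False
--     digits = [int(c) for c in str(n)]
--     prod = 1
--     for d in digits:
--         prod *= d
--     return sum(digits) == prod
-- ===== Notes on version B (the rewrite author's own statement) =====
-- stated objective: idiomatic
-- what changed: B returns False directly for nonpositive inputs, then builds the digit list from the decimal string representation (most-significant-first) and compares its sum with its product, instead of A's arithmetic digit-extraction loop that maintains two running accumulators.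
import Mathlib
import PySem

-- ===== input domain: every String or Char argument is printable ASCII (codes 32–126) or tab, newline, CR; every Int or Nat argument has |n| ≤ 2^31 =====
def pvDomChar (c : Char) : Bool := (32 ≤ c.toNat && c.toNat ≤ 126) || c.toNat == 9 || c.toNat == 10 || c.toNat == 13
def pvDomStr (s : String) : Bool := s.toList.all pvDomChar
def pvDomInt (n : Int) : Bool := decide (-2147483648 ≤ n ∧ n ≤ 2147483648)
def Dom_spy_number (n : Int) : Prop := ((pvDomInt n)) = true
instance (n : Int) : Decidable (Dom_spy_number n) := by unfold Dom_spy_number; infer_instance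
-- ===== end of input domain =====

-- B replaces A's %10-//10 extraction loop with the decimal string's digit list
-- and compares its sum with its product (objective: idiomatic; same cost).

-- ===== PORT A =====
-- while n>0: sum += n%10; product *= n%10; n //= 10
def spyLoopA (n sum product : Int) : Bool :=
  if h : 0 < n then
    spyLoopA (PySem.Int.floordiv n 10) (sum + PySem.Int.mod n 10) (product * PySem.Int.mod n 10)
  else
    decide (sum = product)
termination_by n.toNat
decreasing_by
  rw [PySem.Int.floordiv_eq_ediv_of_pos (by norm_num : (0:Int) < 10)]
  omega

def spy_number (n : Int) : Bool := spyLoopA n 0 1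

-- ===== PORT B =====
def spy_number_alt (n : Int) : Bool :=
  if n ≤ 0 then false
  else
    -- digits = [int(c) for c in str(n)]; int(c) ported as c.toNat - 48 (exact on '0'..'9',
    -- the only characters str(n) produces for n > 0)
    let digits : List Int := (PySem.Int.toStr n).toList.map (fun c => (c.toNat : Int) - 48)
    -- prod = 1; for d in digits: prod *= d
    let prod : Int := digits.foldl (· * ·) 1
    decide (digits.sum = prod)

-- ===== PRECONDITION & SPEC =====
def Spec_spy_number (n : Int) (out : Bool) : Prop := out = spy_number_alt n
instance (n : Int) (out : Bool) : Decidable (Spec_spy_number n out) := by unfold Spec_spy_number; infer_instance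

-- ===== CLAIM (what is proved, stated in full; the proofs are below) =====
def Claim_equal_spy_number : Prop := ∀ (n : Int), Dom_spy_number n → Spec_spy_number n (spy_number n)

-- ===== LEMMAS AND PROOFS =====

-- the digit list of m (least-significant first), as Ints
def digitsZ (m : Nat) : List Int := (Nat.digits 10 m).map Int.ofNat

-- A's loop computes "sum + digit sum = product * digit product"
lemma spyLoopA_eq (m : Nat) (s p : Int) :
    spyLoopA (m : Int) s p = decide (s + (digitsZ m).sum = p * (digitsZ m).prod) := by
  induction m using Nat.strong_induction_on generalizing s p with
  | _ m ih =>
    by_cases hm : 0 < m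
    · have hpos : (0:Int) < (m : Int) := by exact_mod_cast hm
      rw [spyLoopA, dif_pos hpos]
      have h10 : (0:Int) < 10 := by norm_num
      rw [PySem.Int.floordiv_eq_ediv_of_pos h10, PySem.Int.mod_eq_emod_of_pos h10]
      have hdiv : (m : Int) / 10 = ((m / 10 : Nat) : Int) := by omega
      have hmod : (m : Int) % 10 = ((m % 10 : Nat) : Int) := by omega
      rw [hdiv, hmod, ih (m / 10) (Nat.div_lt_self hm (by norm_num))]
      have hdig : digitsZ m = ((m % 10 : Nat) : Int) :: digitsZ (m / 10) := by
        unfold digitsZ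
        rw [Nat.digits_def' (by norm_num : 1 < 10) hm]
        simp
      rw [hdig]
      simp only [List.sum_cons, List.prod_cons]
      congr 1
      ring_nf
    · have hm0 : m = 0 := by omega
      subst hm0
      rw [spyLoopA, dif_neg (by norm_num)]
      simp [digitsZ]

-- A on nonpositive input: the loop body never runs
lemma spyLoopA_nonpos (n s p : Int) (h : ¬ 0 < n) : spyLoopA n s p = decide (s = p) := by
  rw [spyLoopA, dif_neg h]

-- Nat.toDigitsCore produces the base-10 digits, most significant first
lemma toDigitsCore_eq (f : Nat) : ∀ (m : Nat) (ds : List Char), 0 < m → m < f →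
    Nat.toDigitsCore 10 f m ds = ((Nat.digits 10 m).map Nat.digitChar).reverse ++ ds := by
  induction f with
  | zero => intro m ds h hf; omega
  | succ f ih =>
    intro m ds hm hf
    rw [Nat.toDigitsCore]
    by_cases hq : m / 10 = 0
    · rw [if_pos hq]
      have hdig : Nat.digits 10 m = [m % 10] := by
        rw [Nat.digits_def' (by norm_num : 1 < 10) hm, hq]
        simp
      rw [hdig]; simp
    · rw [if_neg hq]
      rw [ih (m / 10) _ (Nat.pos_of_ne_zero hq)
          (by have := Nat.div_lt_self hm (by norm_num : 1 < 10); omega)]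
      rw [Nat.digits_def' (by norm_num : 1 < 10) hm]
      simp

lemma digitChar_val (d : Nat) (h : d < 10) : ((Nat.digitChar d).toNat : Int) - 48 = (d : Int) := by
  interval_cases d <;> decide

-- B's digit list is A's digit list reversed
lemma alt_digits_eq (m : Nat) (hm : 0 < m) :
    (PySem.Int.toStr (m : Int)).toList.map (fun c => ((c.toNat : Int) - 48)) =
      ((Nat.digits 10 m).map Int.ofNat).reverse := by
  rw [PySem.Int.toList_toStr]
  unfold PySem.Int.toChars
  rw [if_neg (by exact_mod_cast Int.not_lt.mpr (Int.natCast_nonneg m))]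
  have htn : ((m : Int)).toNat = m := Int.toNat_natCast m
  rw [htn]
  unfold Nat.toDigits
  rw [toDigitsCore_eq (m + 1) m [] hm (Nat.lt_succ_self m)]
  rw [List.append_nil, List.map_reverse, List.map_map]
  congr 1
  apply List.map_congr_left
  intro d hd
  exact digitChar_val d (Nat.digits_lt_base' hd)

-- ===== VERDICT (by name: the statement is the Claim_ definition above) =====
theorem spy_number_spec : Claim_equal_spy_number := by
  intro n _
  unfold Spec_spy_number spy_number spy_number_alt
  by_cases hn : n ≤ 0
  · rw [spyLoopA_nonpos n 0 1 (by omega), if_pos hn]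
    simp
  · rw [if_neg hn]
    have hm : n = ((n.toNat : Nat) : Int) := by omega
    have hm0 : 0 < n.toNat := by omega
    rw [hm, spyLoopA_eq n.toNat 0 1, alt_digits_eq n.toNat hm0]
    show _ = decide _
    rw [← List.prod_eq_foldl, List.sum_reverse, List.prod_reverse]
    simp [digitsZ]
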